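-- pv_equiv track=rewrite | github.com/namiky/pythonTest | indeed/getIndeed.py | getSalaryCont
-- ===== SOURCE A (Python) =====
-- def getSalaryCont(a):
--     salaryVal=""             # 給与金額を取得。空っぽで宣言
--     peopleVal=""              # 求人数を取得。空っぽで宣言
--     peopleSum=""            # 総求人数を取得。空っぽで宣言
--     flg = True               # 数字⇒文字列⇒数字の切り替え用のフラグ
--     for l in a:           # 1文字ずつ処理
--         if l=="," or l=="$":              # カンマとドルがSkip
--             pass
--         elif l.isdigit():       # 数字なら
--             if flg==True:       #文字に遭遇していないなら
--                 salaryVal=salaryVal+ str(l)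
--             else:
--                 peopleVal+=l
--         else:
--             flg = False
--     return salaryVal,peopleVal
-- ===== SOURCE B (Python) =====
-- def getSalaryCont(a):
--     i = 0
--     while i < len(a) and (a[i].isdigit() or a[i] in ",$"):
--         i += 1
--     salary = ''.join(c for c in a[:i] if c.isdigit())
--     people = ''.join(c for c in a[i:] if c.isdigit())
--     return salary, people
-- ===== Notes on version B (the rewrite author's own statement) =====
-- stated objective: simpler
-- what changed: Replaced A's one-pass loop with a mutable before/after flag by first locating the boundary (first char that is neither a digit nor ','/'$') and then digit-filtering the two slices independently.
import Mathlib
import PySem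

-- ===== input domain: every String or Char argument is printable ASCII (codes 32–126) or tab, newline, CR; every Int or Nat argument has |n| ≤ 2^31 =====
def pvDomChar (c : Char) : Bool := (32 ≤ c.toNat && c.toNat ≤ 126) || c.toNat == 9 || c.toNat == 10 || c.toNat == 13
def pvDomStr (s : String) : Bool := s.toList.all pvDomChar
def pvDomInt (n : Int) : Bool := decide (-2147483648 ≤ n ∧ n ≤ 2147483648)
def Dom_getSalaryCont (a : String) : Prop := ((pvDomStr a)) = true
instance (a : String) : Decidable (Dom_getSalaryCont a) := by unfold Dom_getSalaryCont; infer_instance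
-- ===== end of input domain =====

-- B replaces A's one-pass stateful flag by boundary-finding (first char that is neither a
-- digit nor ','/'$') followed by two independent digit-filtering passes; objective: simpler.

-- ===== PORT A =====
-- A's loop state: (salaryVal, peopleVal, flg); peopleSum is dead in A and dropped.
def pvStepA (st : List Char × List Char × Bool) (l : Char) : List Char × List Char × Bool :=
  if l = ',' ∨ l = '$' then st
  else if PySem.Chars.isdigit l then
    if st.2.2 = true then (st.1 ++ [l], st.2.1, st.2.2)
    else (st.1, st.2.1 ++ [l], st.2.2)
  else (st.1, st.2.1, false)

def getSalaryCont (a : String) : String × String :=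
  let st := a.toList.foldl pvStepA ([], [], true)
  (String.ofList st.1, String.ofList st.2.1)

-- ===== PORT B =====
-- Source B: advance i while a[i] is a digit or in ",$" (= takeWhile/dropWhile on the same
-- predicate), then join the digits of each slice.
def pvBound (c : Char) : Bool := PySem.Chars.isdigit c || c == ',' || c == '$'

def getSalaryCont_alt (a : String) : String × String :=
  let l := a.toList
  (String.ofList ((l.takeWhile pvBound).filter PySem.Chars.isdigit),
   String.ofList ((l.dropWhile pvBound).filter PySem.Chars.isdigit))

-- ===== PRECONDITION & SPEC =====
def Spec_getSalaryCont (a : String) (out : String × String) : Prop := out = getSalaryCont_alt a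
instance (a : String) (out : String × String) : Decidable (Spec_getSalaryCont a out) := by unfold Spec_getSalaryCont; infer_instance

-- ===== CLAIM (what is proved, stated in full; the proofs are below) =====
def Claim_equal_getSalaryCont : Prop := ∀ (a : String), Dom_getSalaryCont a → Spec_getSalaryCont a (getSalaryCont a)

-- ===== LEMMAS AND PROOFS =====
theorem pvFoldFalse (l : List Char) : ∀ (sv pv : List Char),
    l.foldl pvStepA (sv, pv, false) = (sv, pv ++ l.filter PySem.Chars.isdigit, false) := by
  induction l with
  | nil => intro sv pv; simp
  | cons c t ih =>
    intro sv pv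
    by_cases hcs : c = ',' ∨ c = '$'
    · have hd : PySem.Chars.isdigit c = false := by
        rcases hcs with h | h <;> subst h <;> decide
      simp [pvStepA, hcs, hd, ih]
    · by_cases hd : PySem.Chars.isdigit c = true
      · simp [pvStepA, hcs, hd, ih]
      · simp at hd
        simp [pvStepA, hcs, hd, ih]

theorem pvFoldTrue (l : List Char) : ∀ (sv : List Char),
    ((l.foldl pvStepA (sv, [], true)).1 = sv ++ (l.takeWhile pvBound).filter PySem.Chars.isdigit)
    ∧ ((l.foldl pvStepA (sv, [], true)).2.1 = (l.dropWhile pvBound).filter PySem.Chars.isdigit) := by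
  induction l with
  | nil => intro sv; simp
  | cons c t ih =>
    intro sv
    by_cases hb : pvBound c = true
    · by_cases hcs : c = ',' ∨ c = '$'
      · have hd : PySem.Chars.isdigit c = false := by
          rcases hcs with h | h <;> subst h <;> decide
        simp [pvStepA, hcs, hd, hb, ih]
      · have hd : PySem.Chars.isdigit c = true := by
          simp [pvBound] at hb
          push Not at hcs
          tauto
        simp [pvStepA, hcs, hd, hb, ih]
    · have hd : PySem.Chars.isdigit c = false := by
        simp [pvBound] at hb; tauto
      have hcs : ¬ (c = ',' ∨ c = '$') := by
        simp [pvBound] at hb; tauto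
      simp [pvStepA, hcs, hd, hb, pvFoldFalse]

-- ===== VERDICT (by name: the statement is the Claim_ definition above) =====
theorem getSalaryCont_spec : Claim_equal_getSalaryCont := by
  intro a _
  unfold Spec_getSalaryCont getSalaryCont getSalaryCont_alt
  obtain ⟨h1, h2⟩ := pvFoldTrue a.toList []
  simp [h1, h2]
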